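-- pv_equiv track=rewrite | github.com/ikshatelkar/Government_Eligibility | ml-service/re_import_from_api.py | tags_to_occupation
-- ===== SOURCE A (Python) =====
-- OCCUPATION_TAG_MAP = [
--     (["Construction Worker","BOCW","Building Worker","Construction Labour"], "unorganised_worker"),
--     (["Artisan","Handicraft","Handicrafts","Craftsman","Handloom","Weaver",
--       "Weavers","Khadi","Potter","Blacksmith"], "unorganised_worker"),
--     (["Auto Driver","Rickshaw","Taxi Driver","Transport Worker"], "unorganised_worker"),
--     (["Unorganised Worker","Daily Wage","Migrant Worker","Informal Worker",
--       "Street Vendor","Hawker","SVANidhi"], "unorganised_worker"),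
--     (["Fishermen","Fisherman","Fisheries","Aquaculture","Fish Farmer"], "farmer"),
--     (["Farmer","Farmers","Kisan","Agricultural Worker","Agriculture",
--       "Horticulture","Animal Husbandry","Dairy","Sericulture"], "farmer"),
--     (["Student","Students","Scholar","Post Matric","Higher Study",
--       "Scholarship","Fellowship","Trainee","Apprentice"], "student"),
--     (["MSME","Entrepreneur","Entrepreneurship","Enterprise","Self-employment",
--       "Self Employed","Business","Start-up","Startup","Mudra"], "business"),
--     (["Ex-Serviceman","Ex-Service","Veteran","Sainik","ECHS",
--       "Armed Forces","Defence Personnel"], "armed_forces"),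
--     (["Government Employee","Central Government Employee","Civil Servant",
--       "Government Servant","CGHS"], "government_employee"),
-- ]
--
-- def tags_to_occupation(tags, category):
--     tags_lower = [t.lower().strip() for t in (tags or []) if t]
--     tags_set = set(tags_lower)
--     for occ_tags, occ_value in OCCUPATION_TAG_MAP:
--         for t in occ_tags:
--             if t.lower() in tags_set:
--                 return occ_value
--     if category == "Agriculture":
--         return "farmer"
--     if category == "Education":
--         return "student"
--     return "any"
-- ===== SOURCE B (Python) =====
-- OCCUPATION_TAG_MAP = [
--     (["Construction Worker","BOCW","Building Worker","Construction Labour"], "unorganised_worker"),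
--     (["Artisan","Handicraft","Handicrafts","Craftsman","Handloom","Weaver",
--       "Weavers","Khadi","Potter","Blacksmith"], "unorganised_worker"),
--     (["Auto Driver","Rickshaw","Taxi Driver","Transport Worker"], "unorganised_worker"),
--     (["Unorganised Worker","Daily Wage","Migrant Worker","Informal Worker",
--       "Street Vendor","Hawker","SVANidhi"], "unorganised_worker"),
--     (["Fishermen","Fisherman","Fisheries","Aquaculture","Fish Farmer"], "farmer"),
--     (["Farmer","Farmers","Kisan","Agricultural Worker","Agriculture",
--       "Horticulture","Animal Husbandry","Dairy","Sericulture"], "farmer"),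
--     (["Student","Students","Scholar","Post Matric","Higher Study",
--       "Scholarship","Fellowship","Trainee","Apprentice"], "student"),
--     (["MSME","Entrepreneur","Entrepreneurship","Enterprise","Self-employment",
--       "Self Employed","Business","Start-up","Startup","Mudra"], "business"),
--     (["Ex-Serviceman","Ex-Service","Veteran","Sainik","ECHS",
--       "Armed Forces","Defence Personnel"], "armed_forces"),
--     (["Government Employee","Central Government Employee","Civil Servant",
--       "Government Servant","CGHS"], "government_employee"),
-- ]
--
-- # Prebuilt index: lowercased tag -> (rank of its earliest group, that group's occupation).
-- _TAG_INDEX = {}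
-- for _rank, (_group_tags, _occ) in enumerate(OCCUPATION_TAG_MAP):
--     for _t in _group_tags:
--         _TAG_INDEX.setdefault(_t.lower(), (_rank, _occ))
--
-- def tags_to_occupation(tags, category):
--     best = None
--     for t in (tags or []):
--         if not t:
--             continue
--         hit = _TAG_INDEX.get(t.lower().strip())
--         if hit is not None and (best is None or hit[0] < best[0]):
--             best = hit
--     if best is not None:
--         return best[1]
--     if category == "Agriculture":
--         return "farmer"
--     if category == "Education":
--         return "student"
--     return "any"
-- ===== Notes on version B (the rewrite author's own statement) =====
-- stated objective: alternative
-- what changed: A rescans the whole OCCUPATION_TAG_MAP group by group on every call; B prebuilds once, at module load, a lowercased tag -> (group rank, occupation) dict and makes a single min-rank pass over the input tags, so the nested priority scan over the map disappears.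
import Mathlib
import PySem

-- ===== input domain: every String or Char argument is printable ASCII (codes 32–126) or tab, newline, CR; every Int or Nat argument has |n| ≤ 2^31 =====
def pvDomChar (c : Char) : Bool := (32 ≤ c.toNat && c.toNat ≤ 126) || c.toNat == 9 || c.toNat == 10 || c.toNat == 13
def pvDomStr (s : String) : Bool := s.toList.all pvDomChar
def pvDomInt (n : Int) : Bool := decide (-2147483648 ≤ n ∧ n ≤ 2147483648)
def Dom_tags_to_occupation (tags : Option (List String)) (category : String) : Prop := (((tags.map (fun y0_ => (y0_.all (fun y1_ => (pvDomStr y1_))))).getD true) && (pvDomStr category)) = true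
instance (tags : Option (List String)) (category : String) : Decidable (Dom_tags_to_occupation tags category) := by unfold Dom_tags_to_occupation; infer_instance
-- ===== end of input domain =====

-- B replaces A's per-call nested priority scan over OCCUPATION_TAG_MAP by a prebuilt
-- tag → (rank, occupation) index and a single min-rank pass over the input tags (objective: alternative).

def OCCUPATION_TAG_MAP : List (List String × String) := [
  (["Construction Worker","BOCW","Building Worker","Construction Labour"], "unorganised_worker"),
  (["Artisan","Handicraft","Handicrafts","Craftsman","Handloom","Weaver",
    "Weavers","Khadi","Potter","Blacksmith"], "unorganised_worker"),
  (["Auto Driver","Rickshaw","Taxi Driver","Transport Worker"], "unorganised_worker"),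
  (["Unorganised Worker","Daily Wage","Migrant Worker","Informal Worker",
    "Street Vendor","Hawker","SVANidhi"], "unorganised_worker"),
  (["Fishermen","Fisherman","Fisheries","Aquaculture","Fish Farmer"], "farmer"),
  (["Farmer","Farmers","Kisan","Agricultural Worker","Agriculture",
    "Horticulture","Animal Husbandry","Dairy","Sericulture"], "farmer"),
  (["Student","Students","Scholar","Post Matric","Higher Study",
    "Scholarship","Fellowship","Trainee","Apprentice"], "student"),
  (["MSME","Entrepreneur","Entrepreneurship","Enterprise","Self-employment",
    "Self Employed","Business","Start-up","Startup","Mudra"], "business"),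
  (["Ex-Serviceman","Ex-Service","Veteran","Sainik","ECHS",
    "Armed Forces","Defence Personnel"], "armed_forces"),
  (["Government Employee","Central Government Employee","Civil Servant",
    "Government Servant","CGHS"], "government_employee")]

-- ===== PORT A =====
-- A's inner loop: `for t in occ_tags: if t.lower() in tags_set: return occ_value`
def pvAInner (s : PySem.Set String) (ts : List String) (occ : String) : Option String :=
  match ts with
  | [] => none
  | t :: rest => if PySem.Set.contains s (PySem.Str.lower t) then some occ else pvAInner s rest occ

-- A's outer loop over OCCUPATION_TAG_MAP (returning `some` models the early return)
def pvAScan (s : PySem.Set String) (m : List (List String × String)) : Option String :=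
  match m with
  | [] => none
  | (occ_tags, occ_value) :: rest =>
    match pvAInner s occ_tags occ_value with
    | some v => some v
    | none => pvAScan s rest

def tags_to_occupation (tags : Option (List String)) (category : String) : String :=
  let tags_lower := ((tags.getD []).filter (fun t => !(t == ""))).map
    (fun t => PySem.Str.strip (PySem.Str.lower t))
  let tags_set : PySem.Set String := PySem.Set.ofList tags_lower
  match pvAScan tags_set OCCUPATION_TAG_MAP with
  | some v => v
  | none =>
    if category == "Agriculture" then "farmer"
    else if category == "Education" then "student"
    else "any"

-- ===== PORT B =====
-- module-level index: lowercased tag -> (rank of its earliest group, that group's occupation)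
def pvTagIndex : PySem.Dict String (Int × String) :=
  (PySem.List.enumerate OCCUPATION_TAG_MAP 0).foldl
    (fun d p => p.2.1.foldl (fun d t => d.setdefault (PySem.Str.lower t) (p.1, p.2.2)) d)
    PySem.Dict.empty

def tags_to_occupation_alt (tags : Option (List String)) (category : String) : String :=
  let best := (tags.getD []).foldl
    (fun (b : Option (Int × String)) t =>
      if t == "" then b
      else
        match pvTagIndex.get? (PySem.Str.strip (PySem.Str.lower t)) with
        | none => b
        | some hit =>
          match b with
          | none => some hit
          | some bv => if hit.1 < bv.1 then some hit else b) none
  match best with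
  | some bv => bv.2
  | none =>
    if category == "Agriculture" then "farmer"
    else if category == "Education" then "student"
    else "any"

-- ===== PRECONDITION & SPEC =====
def Spec_tags_to_occupation (tags : Option (List String)) (category : String) (out : String) : Prop := out = tags_to_occupation_alt tags category
instance (tags : Option (List String)) (category : String) (out : String) : Decidable (Spec_tags_to_occupation tags category out) := by unfold Spec_tags_to_occupation; infer_instance

-- ===== CLAIM (what is proved, stated in full; the proofs are below) =====
def Claim_equal_tags_to_occupation : Prop := ∀ (tags : Option (List String)) (category : String), Dom_tags_to_occupation tags category → Spec_tags_to_occupation tags category (tags_to_occupation tags category)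

-- ===== LEMMAS AND PROOFS =====

-- reference "first group containing t, with its rank" lookup, offset k
def pvLk (m : List (List String × String)) (t : String) (k : Int) : Option (Int × String) :=
  match m with
  | [] => none
  | (ts, occ) :: rest =>
    if ts.any (fun u => PySem.Str.lower u == t) then some (k, occ) else pvLk rest t (k + 1)

-- B's fold step, abstracted over the lookup function
def pvStep (f : String → Option (Int × String)) (b : Option (Int × String)) (t : String) :
    Option (Int × String) :=
  match f t with
  | none => b
  | some hit =>
    match b with
    | none => some hit
    | some bv => if hit.1 < bv.1 then some hit else b

theorem pvLk_shift (m : List (List String × String)) (t : String) (k : Int) :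
    pvLk m t (k + 1) = (pvLk m t k).map (fun p => (p.1 + 1, p.2)) := by
  induction m generalizing k with
  | nil => rfl
  | cons g rest ih =>
    obtain ⟨ts, occ⟩ := g
    simp only [pvLk]
    split <;> simp [ih]

theorem pvLk_nonneg (m : List (List String × String)) (t : String) (k : Int)
    (p : Int × String) (h : pvLk m t k = some p) : k ≤ p.1 := by
  induction m generalizing k with
  | nil => simp [pvLk] at h
  | cons g rest ih =>
    obtain ⟨ts, occ⟩ := g
    simp only [pvLk] at h
    split at h
    · cases h; simp
    · have := ih (k + 1) h; omega

-- the inner setdefault loop of the index builder, characterised by get?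
theorem pvIdx_inner (ts : List String) (r : Int) (occ : String)
    (d : PySem.Dict String (Int × String)) (t : String) :
    (ts.foldl (fun d u => d.setdefault (PySem.Str.lower u) (r, occ)) d).get? t =
      match d.get? t with
      | some v => some v
      | none => if ts.any (fun u => PySem.Str.lower u == t) then some (r, occ) else none := by
  induction ts generalizing d with
  | nil => cases hd : d.get? t <;> simp [hd]
  | cons u rest ih =>
    simp only [List.foldl_cons]
    rw [ih]
    by_cases hu : PySem.Str.lower u = t
    · rw [← hu, PySem.Dict.get?_setdefault_self]
      cases hd : d.get? (PySem.Str.lower u) <;> simp_all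
    · rw [PySem.Dict.get?_setdefault_of_ne _ _ (Ne.symm hu)]
      cases hd : d.get? t <;> simp_all [List.any_cons]

-- the whole index builder computes pvLk
theorem pvIdx_scan (m : List (List String × String)) (k : Int)
    (d : PySem.Dict String (Int × String)) (t : String) :
    ((PySem.List.enumerate m k).foldl
        (fun d p => p.2.1.foldl (fun d t => d.setdefault (PySem.Str.lower t) (p.1, p.2.2)) d)
        d).get? t =
      match d.get? t with
      | some v => some v
      | none => pvLk m t k := by
  induction m generalizing k d with
  | nil =>
    simp only [PySem.List.enumerate_nil, List.foldl_nil, pvLk]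
    cases hd : d.get? t <;> simp_all
  | cons g rest ih =>
    obtain ⟨ts, occ⟩ := g
    rw [PySem.List.enumerate_cons, List.foldl_cons, ih, pvIdx_inner]
    cases hd : d.get? t
    · simp only [pvLk]
      cases hany : ts.any (fun u => PySem.Str.lower u == t) <;> simp_all
    · simp

theorem pvTagIndex_get (t : String) : pvTagIndex.get? t = pvLk OCCUPATION_TAG_MAP t 0 := by
  rw [pvTagIndex, pvIdx_scan]
  simp [PySem.Dict.get?_empty]

-- A's inner loop is an `any` test
theorem pvAInner_eq (s : PySem.Set String) (ts : List String) (occ : String) :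
    pvAInner s ts occ =
      if ts.any (fun u => PySem.Set.contains s (PySem.Str.lower u)) then some occ else none := by
  induction ts with
  | nil => rfl
  | cons u rest ih =>
    simp only [pvAInner, ih, List.any_cons]
    by_cases h : PySem.Str.lower u ∈ s <;> simp [h]

-- shifting every rank by +1 commutes with B's min fold
theorem pvFold_shift (f : String → Option (Int × String)) (s : List String)
    (b : Option (Int × String)) :
    s.foldl (pvStep (fun t => (f t).map (fun p => (p.1 + 1, p.2)))) (b.map (fun p => (p.1 + 1, p.2)))
      = (s.foldl (pvStep f) b).map (fun p => (p.1 + 1, p.2)) := by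
  induction s generalizing b with
  | nil => rfl
  | cons t rest ih =>
    simp only [List.foldl_cons, ← ih]
    congr 1
    simp only [pvStep]
    cases hf : f t with
    | none => simp
    | some p =>
      cases b with
      | none => simp
      | some bv =>
        by_cases h : p.1 < bv.1 <;> simp [h, show (p.1 + 1 < bv.1 + 1) = (p.1 < bv.1) by simp]

-- once a rank-0 hit exists, B's fold ends at (0, occ)
theorem pvFold_zero (f : String → Option (Int × String)) (occ : String)
    (hf : ∀ t p, f t = some p → 0 ≤ p.1 ∧ (p.1 = 0 → p = (0, occ)))
    (s : List String) (b : Option (Int × String))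
    (hb : b = none ∨ ∃ p, b = some p ∧ 0 ≤ p.1 ∧ (p.1 = 0 → p = (0, occ)))
    (hx : (∃ t ∈ s, f t = some (0, occ)) ∨ b = some (0, occ)) :
    s.foldl (pvStep f) b = some (0, occ) := by
  induction s generalizing b with
  | nil =>
    rcases hx with ⟨t, ht, _⟩ | h
    · exact absurd ht (List.not_mem_nil)
    · simp [h]
  | cons t rest ih =>
    simp only [List.foldl_cons]
    have hb' : pvStep f b t = none ∨
        ∃ p, pvStep f b t = some p ∧ 0 ≤ p.1 ∧ (p.1 = 0 → p = (0, occ)) := by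
      simp only [pvStep]
      cases hf' : f t with
      | none => exact hb
      | some p =>
        have hp := hf t p hf'
        rcases hb with h | ⟨q, hq, hq2⟩
        · exact Or.inr ⟨p, by simp [h], hp⟩
        · subst hq
          by_cases h : p.1 < q.1
          · exact Or.inr ⟨p, by simp [h], hp⟩
          · exact Or.inr ⟨q, by simp [h], hq2⟩
    apply ih _ hb'
    rcases hx with ⟨u, hu, hfu⟩ | h
    · rcases List.mem_cons.mp hu with rfl | hu'
      · right
        simp only [pvStep, hfu]
        rcases hb with h | ⟨q, hq, hq1, hq2⟩
        · simp [h]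
        · subst hq
          by_cases h : (0 : Int) < q.1
          · simp [h]
          · have : q.1 = 0 := le_antisymm (by omega) hq1
            simp [hq2 this]
      · exact Or.inl ⟨u, hu', hfu⟩
    · right
      simp only [pvStep]
      cases hf' : f t with
      | none => exact h
      | some p =>
        have hp := hf t p hf'
        subst h
        have : ¬ p.1 < 0 := by omega
        simp [this]

-- MAIN: B's min-rank fold over the cleaned tags equals A's priority scan
theorem pvMain (m : List (List String × String)) (s : List String) :
    (s.foldl (pvStep (fun t => pvLk m t 0)) none).map (·.2) =
      pvAScan (PySem.Set.ofList s) m := by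
  induction m with
  | nil =>
    have : s.foldl (pvStep (fun t => pvLk ([] : List (List String × String)) t 0)) none = none := by
      induction s with
      | nil => rfl
      | cons t rest ih => simpa [pvStep, pvLk] using ih
    simp [this, pvAScan]
  | cons g rest ih =>
    obtain ⟨ts, occ⟩ := g
    by_cases hhit : ∃ t ∈ s, ts.any (fun u => PySem.Str.lower u == t) = true
    · -- some cleaned tag is in the head group: A returns occ, B's min rank is 0
      have hany : ts.any (fun u => PySem.Set.contains (PySem.Set.ofList s) (PySem.Str.lower u)) = true := by
        obtain ⟨t, hts, hany⟩ := hhit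
        obtain ⟨u, hu, hequ⟩ := List.any_eq_true.mp hany
        refine List.any_eq_true.mpr ⟨u, hu, ?_⟩
        have : PySem.Str.lower u = t := by simpa using hequ
        rw [this]
        exact (PySem.Set.contains_iff _ _).mpr ((PySem.Set.mem_ofList _ _).mpr hts)
      have hscan : pvAScan (PySem.Set.ofList s) ((ts, occ) :: rest) = some occ := by
        simp only [pvAScan, pvAInner_eq, hany, if_true]
      have hzero : s.foldl (pvStep (fun t => pvLk ((ts, occ) :: rest) t 0)) none = some (0, occ) := by
        apply pvFold_zero
        · intro t p hp
          simp only [pvLk] at hp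
          split at hp
          · cases hp; simp
          · constructor
            · have := pvLk_nonneg rest t 1 p hp; omega
            · intro h0; have := pvLk_nonneg rest t 1 p hp; omega
        · exact Or.inl rfl
        · obtain ⟨t, hts, hany'⟩ := hhit
          exact Or.inl ⟨t, hts, by simp [pvLk, hany']⟩
      rw [hscan, hzero]
      rfl
    · -- no cleaned tag in the head group: both sides drop to the tail
      have hany : ts.any (fun u => PySem.Set.contains (PySem.Set.ofList s) (PySem.Str.lower u)) = false := by
        rw [List.any_eq_false]
        intro u hu
        simp only [Bool.not_eq_true]
        by_contra hc
        have hmem : PySem.Str.lower u ∈ s := by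
          have := (PySem.Set.contains_iff (PySem.Set.ofList s) (PySem.Str.lower u)).mp
            (by simpa using hc)
          exact (PySem.Set.mem_ofList _ _).mp this
        exact hhit ⟨PySem.Str.lower u, hmem, List.any_eq_true.mpr ⟨u, hu, by simp⟩⟩
      have hscan : pvAScan (PySem.Set.ofList s) ((ts, occ) :: rest) =
          pvAScan (PySem.Set.ofList s) rest := by
        simp only [pvAScan, pvAInner_eq, hany]
        rfl
      have hfeq : ∀ t ∈ s, pvLk ((ts, occ) :: rest) t 0 =
          (pvLk rest t 0).map (fun p => (p.1 + 1, p.2)) := by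
        intro t hts
        have hno : ts.any (fun u => PySem.Str.lower u == t) = false := by
          rw [List.any_eq_false]
          intro u hu
          simp only [Bool.not_eq_true, beq_eq_false_iff_ne]
          intro hequ
          exact hhit ⟨t, hts, List.any_eq_true.mpr ⟨u, hu, by simp [hequ]⟩⟩
        rw [show pvLk ((ts, occ) :: rest) t 0 = pvLk rest t (0 + 1) by simp [pvLk, hno]]
        rw [pvLk_shift]
      have hcongr : s.foldl (pvStep (fun t => pvLk ((ts, occ) :: rest) t 0)) none =
          s.foldl (pvStep (fun t => (pvLk rest t 0).map (fun p => (p.1 + 1, p.2)))) none := by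
        apply PySem.List.foldl_congr_mem
        intro b t ht
        simp only [pvStep, hfeq t ht]
      have hmapsnd : ∀ (x : Option (Int × String)),
          (x.map (fun p => (p.1 + 1, p.2))).map (·.2) = x.map (·.2) := by
        intro x; cases x <;> rfl
      rw [hscan, hcongr,
        show (none : Option (Int × String)) =
          Option.map (fun (p : Int × String) => (p.1 + 1, p.2)) none from rfl,
        pvFold_shift, hmapsnd, ih]

-- ===== VERDICT (by name: the statement is the Claim_ definition above) =====
theorem tags_to_occupation_spec : Claim_equal_tags_to_occupation := by
  intro tags category _
  unfold Spec_tags_to_occupation tags_to_occupation tags_to_occupation_alt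
  simp only [pvTagIndex_get]
  have key : (tags.getD []).foldl
      (fun (b : Option (Int × String)) t =>
        if t == "" then b
        else
          match pvLk OCCUPATION_TAG_MAP (PySem.Str.strip (PySem.Str.lower t)) 0 with
          | none => b
          | some hit =>
            match b with
            | none => some hit
            | some bv => if hit.1 < bv.1 then some hit else b) none =
      (((tags.getD []).filter (fun t => !(t == ""))).map
          (fun t => PySem.Str.strip (PySem.Str.lower t))).foldl
        (pvStep (fun t => pvLk OCCUPATION_TAG_MAP t 0)) none := by
    rw [List.foldl_map, List.foldl_filter]
    apply PySem.List.foldl_congr_mem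
    intro b t _
    cases h : t == "" <;> simp [pvStep]
  rw [key, ← pvMain]
  cases ((((tags.getD []).filter (fun t => !(t == ""))).map
      (fun t => PySem.Str.strip (PySem.Str.lower t))).foldl
      (pvStep (fun t => pvLk OCCUPATION_TAG_MAP t 0)) none) <;> rfl
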